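-- pv_equiv track=rewrite | github.com/Hikmetpinarbas/hpfa | hpfa-main/hpfa/narrative/forensic_guard.py | _mask_quotes_per_line
-- ===== SOURCE A (Python) =====
-- from typing import Any, Dict, List, Optional, Tuple
--
-- def _mask_quotes_per_line(line: str) -> Tuple[str, Optional[str]]:
--     if '"' not in line:
--         return line, None
--
--     masked: List[str] = []
--     in_q = False
--     for ch in line:
--         if ch == '"':
--             in_q = not in_q
--             masked.append('"')
--         else:
--             masked.append(" " if in_q else ch)
--
--     if in_q:
--         return line, "UNMATCHED_QUOTES"
--     return "".join(masked), None
-- ===== SOURCE B (Python) =====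
-- from typing import Optional, Tuple
--
--
-- def _mask_quotes_per_line(line: str) -> Tuple[str, Optional[str]]:
--     parts = line.split('"')
--     if (len(parts) - 1) % 2 == 1:
--         return line, "UNMATCHED_QUOTES"
--     return '"'.join(seg if i % 2 == 0 else ' ' * len(seg)
--                     for i, seg in enumerate(parts)), None
-- ===== Notes on version B (the rewrite author's own statement) =====
-- stated objective: simpler
-- what changed: Replaces the char-by-char toggle scan with a split on the quote character: an odd quote count (segment count minus one) means unmatched quotes, otherwise odd-indexed segments (inside quotes) are replaced by same-length runs of spaces and the segments are rejoined.
import Mathlib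
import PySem

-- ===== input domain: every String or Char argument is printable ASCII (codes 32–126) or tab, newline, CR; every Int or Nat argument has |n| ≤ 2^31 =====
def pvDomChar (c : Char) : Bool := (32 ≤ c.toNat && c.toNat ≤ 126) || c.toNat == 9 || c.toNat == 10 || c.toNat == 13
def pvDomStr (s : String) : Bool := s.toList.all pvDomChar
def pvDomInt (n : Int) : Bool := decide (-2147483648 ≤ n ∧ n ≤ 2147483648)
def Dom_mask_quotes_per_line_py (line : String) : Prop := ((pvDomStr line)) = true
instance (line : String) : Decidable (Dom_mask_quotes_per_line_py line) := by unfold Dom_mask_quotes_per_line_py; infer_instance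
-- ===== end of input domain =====

-- B replaces A's char-by-char quote-toggle scan by split-on-'"' with segment-parity masking; same O(n) cost, simpler.

-- ===== PORT A =====
def mask_quotes_per_line_py (line : String) : String × Option String :=
  if PySem.Chars.isIn ['"'] line.toList = false then
    (line, none)
  else
    let st := line.toList.foldl
      (fun (st : List Char × Bool) ch =>
        if ch = '"' then (st.1 ++ ['"'], !st.2)
        else (st.1 ++ [if st.2 then ' ' else ch], st.2))
      ([], false)
    if st.2 then (line, some "UNMATCHED_QUOTES")
    else (String.ofList st.1, none)

-- ===== PORT B =====
def mask_quotes_per_line_py_alt (line : String) : String × Option String :=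
  let parts := PySem.Chars.splitOn line.toList ['"']
  if ((parts.length : Int) - 1) % 2 == 1 then
    (line, some "UNMATCHED_QUOTES")
  else
    (String.ofList (PySem.Chars.join ['"'] ((PySem.List.enumerate parts 0).map
      (fun p => if p.1 % 2 == 0 then p.2 else List.replicate p.2.length ' '))), none)

-- ===== PRECONDITION & SPEC =====
def Spec_mask_quotes_per_line_py (line : String) (out : String × Option String) : Prop := out = mask_quotes_per_line_py_alt line
instance (line : String) (out : String × Option String) : Decidable (Spec_mask_quotes_per_line_py line out) := by unfold Spec_mask_quotes_per_line_py; infer_instance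

-- ===== CLAIM (what is proved, stated in full; the proofs are below) =====
def Claim_equal_mask_quotes_per_line_py : Prop := ∀ (line : String), Dom_mask_quotes_per_line_py line → Spec_mask_quotes_per_line_py line (mask_quotes_per_line_py line)

-- ===== LEMMAS AND PROOFS =====

/-- Simple structural recursion computing `cs.split('"')`. -/
def pvSplit1 : List Char → List (List Char)
  | [] => [[]]
  | c :: cs => if c = '"' then [] :: pvSplit1 cs else (pvSplit1 cs).modifyHead (c :: ·)

lemma pvSplit1_ne_nil (cs : List Char) : pvSplit1 cs ≠ [] := by
  cases cs with
  | nil => simp [pvSplit1]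
  | cons c cs =>
    simp only [pvSplit1]
    split
    · simp
    · cases h : pvSplit1 cs with
      | nil => exact absurd h (pvSplit1_ne_nil cs)
      | cons p ps => simp [List.modifyHead]

lemma splitOn_go_eq (cs : List Char) : ∀ (fuel : Nat) (cur : List Char) (acc : List (List Char)),
    cs.length < fuel →
    PySem.Chars.splitOn.go ['"'] fuel cs cur acc
      = acc.reverse ++ (pvSplit1 cs).modifyHead (cur.reverse ++ ·) := by
  induction cs with
  | nil =>
    intro fuel cur acc h
    cases fuel with
    | zero => omega
    | succ f => simp [PySem.Chars.splitOn.go, pvSplit1]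
  | cons c cs ih =>
    intro fuel cur acc h
    cases fuel with
    | zero => simp at h
    | succ f =>
      by_cases hc : c = '"'
      · subst hc
        rw [PySem.Chars.splitOn.go]
        simp only [List.isPrefixOf, BEq.rfl, Bool.true_and, List.isPrefixOf_nil_left, if_true,
          List.length_singleton, List.drop_one, List.tail_cons]
        rw [ih f [] (cur.reverse :: acc) (by simp at h; omega)]
        obtain ⟨p, ps, hp⟩ := List.exists_cons_of_ne_nil (pvSplit1_ne_nil cs)
        simp [pvSplit1, hp, List.modifyHead]
      · rw [PySem.Chars.splitOn.go]
        have hpre : ['"'].isPrefixOf (c :: cs) = false := by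
          simp [List.isPrefixOf]; exact fun hh => absurd hh.symm hc
        rw [hpre]
        simp only [if_false, Bool.false_eq_true]
        rw [ih f (c :: cur) acc (by simp at h; omega)]
        simp only [pvSplit1, if_neg hc]
        obtain ⟨p, ps, hp⟩ := List.exists_cons_of_ne_nil (pvSplit1_ne_nil cs)
        simp [hp, List.modifyHead]

lemma splitOn_eq (cs : List Char) : PySem.Chars.splitOn cs ['"'] = pvSplit1 cs := by
  rw [PySem.Chars.splitOn, splitOn_go_eq cs (cs.length + 1) [] [] (by omega)]
  obtain ⟨p, ps, hp⟩ := List.exists_cons_of_ne_nil (pvSplit1_ne_nil cs)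
  simp [hp, List.modifyHead]

/-- A's loop as a structural recursion: masked output and final `in_q` from state `q`. -/
def pvMask : Bool → List Char → List Char × Bool
  | q, [] => ([], q)
  | q, c :: cs =>
    if c = '"' then
      let r := pvMask (!q) cs; ('"' :: r.1, r.2)
    else
      let r := pvMask q cs; ((if q then ' ' else c) :: r.1, r.2)

lemma foldA_eq (cs : List Char) : ∀ (m : List Char) (q : Bool),
    cs.foldl
      (fun (st : List Char × Bool) ch =>
        if ch = '"' then (st.1 ++ ['"'], !st.2)
        else (st.1 ++ [if st.2 then ' ' else ch], st.2)) (m, q)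
      = (m ++ (pvMask q cs).1, (pvMask q cs).2) := by
  induction cs with
  | nil => intro m q; simp [pvMask]
  | cons c cs ih =>
    intro m q
    by_cases hc : c = '"'
    · subst hc; simp [pvMask, ih]
    · simp [pvMask, hc, ih]

/-- Alternate masking of segments, then rejoin with quotes; `q` = parity state of the head. -/
def pvMM : Bool → List (List Char) → List Char
  | _, [] => []
  | q, [p] => if q then List.replicate p.length ' ' else p
  | q, p :: p2 :: ps =>
      (if q then List.replicate p.length ' ' else p) ++ '"' :: pvMM (!q) (p2 :: ps)

lemma pvMask_eq (cs : List Char) : ∀ q : Bool,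
    pvMask q cs = (pvMM q (pvSplit1 cs), xor q (decide ((pvSplit1 cs).length % 2 = 0))) := by
  induction cs with
  | nil => intro q; cases q <;> simp [pvMask, pvSplit1, pvMM]
  | cons c cs ih =>
    intro q
    obtain ⟨p, ps, hp⟩ := List.exists_cons_of_ne_nil (pvSplit1_ne_nil cs)
    by_cases hc : c = '"'
    · subst hc
      rw [show pvMask q ('"' :: cs) = ('"' :: (pvMask (!q) cs).1, (pvMask (!q) cs).2) from by
        simp [pvMask]]
      rw [show pvSplit1 ('"' :: cs) = [] :: pvSplit1 cs from by simp [pvSplit1]]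
      rw [ih (!q)]
      have h2 : ((pvSplit1 cs).length + 1) % 2 = 0 ↔ ¬ ((pvSplit1 cs).length % 2 = 0) := by omega
      refine Prod.ext ?_ ?_
      · simp [hp, pvMM]
      · simp only [List.length_cons]
        cases q <;> by_cases hE : (pvSplit1 cs).length % 2 = 0 <;> simp [hE, h2]
    · rw [show pvMask q (c :: cs) = ((if q then ' ' else c) :: (pvMask q cs).1, (pvMask q cs).2)
        from by simp [pvMask, hc]]
      rw [show pvSplit1 (c :: cs) = (pvSplit1 cs).modifyHead (c :: ·) from by
        simp [pvSplit1, hc]]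
      rw [ih q]
      refine Prod.ext ?_ ?_
      · cases ps with
        | nil => cases q <;> simp [hp, pvMM, List.modifyHead, List.replicate_succ]
        | cons p2 ps => cases q <;> simp [hp, pvMM, List.modifyHead, List.replicate_succ]
      · simp [hp, List.modifyHead]

lemma join_enum_eq (parts : List (List Char)) : ∀ (n : Nat),
    PySem.Chars.join ['"'] ((PySem.List.enumerate parts (n : Int)).map
      (fun p => if p.1 % 2 == 0 then p.2 else List.replicate p.2.length ' '))
      = pvMM (decide (n % 2 = 1)) parts := by
  induction parts with
  | nil => intro n; simp [PySem.List.enumerate_nil, PySem.Chars.join_nil, pvMM]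
  | cons p ps ih =>
    intro n
    have hmod : ((n : Int) % 2 == 0) = decide (¬ (n % 2 = 1)) := by
      by_cases h : n % 2 = 1 <;> simp [h] <;> omega
    cases ps with
    | nil =>
      simp only [PySem.List.enumerate_cons, PySem.List.enumerate_nil, List.map, pvMM,
        PySem.Chars.join_singleton, hmod]
      by_cases h : n % 2 = 1 <;> simp [h]
    | cons p2 ps =>
      have hrec := ih (n + 1)
      push_cast at hrec
      simp only [PySem.List.enumerate_cons, List.map] at hrec
      have hflip : decide ((n + 1) % 2 = 1) = !decide (n % 2 = 1) := by
        by_cases h : n % 2 = 1 <;> simp [h] <;> omega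
      simp only [PySem.List.enumerate_cons, List.map, pvMM, PySem.Chars.join_cons_cons, hmod]
      rw [hrec, hflip]
      by_cases h : n % 2 = 1 <;> simp [h]

lemma pvSplit1_no_quote (cs : List Char) (h : '"' ∉ cs) : pvSplit1 cs = [cs] := by
  induction cs with
  | nil => simp [pvSplit1]
  | cons c cs ih =>
    simp only [List.mem_cons, not_or] at h
    simp [pvSplit1, Ne.symm h.1, h.1, ih h.2, List.modifyHead]

-- ===== VERDICT (by name: the statement is the Claim_ definition above) =====
theorem mask_quotes_per_line_py_spec : Claim_equal_mask_quotes_per_line_py := by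
  intro line _
  unfold Spec_mask_quotes_per_line_py mask_quotes_per_line_py mask_quotes_per_line_py_alt
  set cs := line.toList with hcs
  rw [splitOn_eq]
  have hjoin := join_enum_eq (pvSplit1 cs) 0
  simp only [Nat.cast_zero] at hjoin
  have hfold := foldA_eq cs [] false
  have hL := pvSplit1_ne_nil cs
  rw [show (decide (0 % 2 = 1)) = false from rfl] at hjoin
  by_cases hq : PySem.Chars.isIn ['"'] cs = false
  · -- no quote in the line
    have hmem : '"' ∉ cs := by
      intro hm
      have := (PySem.Chars.isIn_iff_infix (sub := ['"']) (s := cs)).2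
        ((List.singleton_infix_iff _ _).2 hm)
      simp [this] at hq
    rw [if_pos hq]
    rw [pvSplit1_no_quote cs hmem] at hjoin ⊢
    norm_num at hjoin ⊢
    rw [hjoin]
    simp only [pvMM, Bool.false_eq_true, if_false]
    exact String.ofList_toList.symm
  · rw [if_neg hq]
    simp only [hfold, List.nil_append, pvMask_eq cs false, Bool.false_xor]
    have h1 : 0 < (pvSplit1 cs).length := List.length_pos_of_ne_nil hL
    by_cases hpar : (pvSplit1 cs).length % 2 = 0
    · -- even number of parts = odd quote count = unmatched
      have hg : ((((pvSplit1 cs).length : Int) - 1) % 2 == 1) = true := by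
        simp only [beq_iff_eq]; omega
      have hmask : (decide ((pvSplit1 cs).length % 2 = 0)) = true := by simp [hpar]
      rw [hmask, hg]
      simp only [if_true]
    · have hg : ((((pvSplit1 cs).length : Int) - 1) % 2 == 1) = false := by
        simp only [beq_eq_false_iff_ne, ne_eq]; omega
      have hmask : (decide ((pvSplit1 cs).length % 2 = 0)) = false := by simp [hpar]
      rw [hmask, hg]
      simp only [Bool.false_eq_true, if_false]
      rw [hjoin]
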